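-- pv_equiv track=rewrite | github.com/AdroMine/AdventOfCode | 2015/Day20/d20_solution.py | lowest_house
-- ===== SOURCE A (Python) =====
-- def lowest_house(reqd_num: int, N: int) -> tuple[int, int]:
--     # find all divisors up to N
--     divisors1 = [[] for k in range(N)]
--     divisors2 = [[] for k in range(N)]
--     for i in range(2, N):
--         count = 0
--         for j in range(i, N, i):
--             divisors1[j].append(i)
--             count += 1
--             if count <= 50:
--                 divisors2[j].append(i)
--
--     # Part 1
--     i = 0
--     for i in range(N):
--         presents = sum(divisors1[i])*10 + 10
--         if presents > reqd_num:
--             break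
--     part1 = i
--
--     # Part 2
--     for i in range(N):
--         presents = sum(divisors2[i])*11 + 11
--         if presents > reqd_num:
--             break
--     part2 = i
--
--     return part1, part2
-- ===== SOURCE B (Python) =====
-- def lowest_house(reqd_num: int, N: int) -> tuple[int, int]:
--     # Per-house divisor sums by trial division up to sqrt(n), fused single pass
--     # that stops as soon as both parts are decided (no sieve, no divisor lists).
--     part1 = None
--     part2 = None
--     last = 0
--     for n in range(N):
--         last = n
--         s1 = 0  # sum of divisors of n that are >= 2
--         s2 = 0  # same, restricted to divisors x with n // x <= 50
--         d = 1
--         while d * d <= n: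
--             if n % d == 0:
--                 e = n // d
--                 for x in ((d, e) if d != e else (d,)):
--                     if x >= 2:
--                         s1 += x
--                         if n // x <= 50:
--                             s2 += x
--             d += 1
--         if part1 is None and s1 * 10 + 10 > reqd_num:
--             part1 = n
--         if part2 is None and s2 * 11 + 11 > reqd_num:
--             part2 = n
--         if part1 is not None and part2 is not None:
--             break
--     if part1 is None:
--         part1 = last
--     if part2 is None:
--         part2 = last
--     return part1, part2
-- ===== Notes on version B (the rewrite author's own statement) =====
-- stated objective: faster
-- what changed: Replaces the two O(N)-memory divisor-list sieves plus two full scans by a single fused pass over houses that computes each house's divisor sum on demand by trial division up to sqrt(n) and stops as soon as both answers are decided.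
import Mathlib
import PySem

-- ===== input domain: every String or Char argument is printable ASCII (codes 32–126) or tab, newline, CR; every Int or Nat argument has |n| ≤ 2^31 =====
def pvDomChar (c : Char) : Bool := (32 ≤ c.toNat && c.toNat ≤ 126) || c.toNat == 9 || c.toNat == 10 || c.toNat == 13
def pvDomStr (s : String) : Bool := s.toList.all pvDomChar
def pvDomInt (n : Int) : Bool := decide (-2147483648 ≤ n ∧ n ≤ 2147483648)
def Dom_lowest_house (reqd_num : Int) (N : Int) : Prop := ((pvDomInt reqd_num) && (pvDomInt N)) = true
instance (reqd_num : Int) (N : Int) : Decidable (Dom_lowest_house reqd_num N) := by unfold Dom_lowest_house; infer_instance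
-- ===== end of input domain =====

-- B replaces A's two divisor-list sieves and two scans by one fused pass doing per-house
-- sqrt-trial-division that stops once both parts are decided (objective: faster on inputs
-- where some house exceeds the threshold, and O(1) memory).

-- ===== PORT A =====
-- Python sum(list) of ints
def pySum (l : List Int) : Int := l.foldl (· + ·) 0

-- inner sieve loop `for j in range(i, N, i)` with its running `count`:
-- j = i*k and count = k for the k-th multiple, k = 1 .. (M-1)/i (the multiples of i below M).
def sieveStep (M : Nat) (st : Array (List Int) × Array (List Int)) (i : Nat) :
    Array (List Int) × Array (List Int) :=
  (List.range' 1 ((M - 1) / i)).foldl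
    (fun st k =>
      (st.1.modify (i * k) (fun l => l ++ [(i : Int)]),
       if k ≤ 50 then st.2.modify (i * k) (fun l => l ++ [(i : Int)]) else st.2))
    st

-- `i = 0; for i in range(M): presents = f i; if presents > r: break` ; returns the final i
def loopA (f : Nat → Int) (r : Int) (M k : Nat) : Nat :=
  if _h : k < M then
    if f k > r then k
    else if k + 1 < M then loopA f r M (k + 1) else k
  else k
termination_by M - k

def lowest_house (reqd_num : Int) (N : Int) : Int × Int :=
  let M := N.toNat
  let st := (List.range' 2 (M - 2)).foldl (sieveStep M)
      (Array.replicate M ([] : List Int), Array.replicate M ([] : List Int))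
  let part1 := loopA (fun n => pySum st.1[n]! * 10 + 10) reqd_num M 0
  let part2 := loopA (fun n => pySum st.2[n]! * 11 + 11) reqd_num M 0
  ((part1 : Int), (part2 : Int))

-- ===== PORT B =====
-- `while d*d <= n:` trial division accumulating (s1, s2)
def trialGo (n d : Nat) (s : Int × Int) : Int × Int :=
  if _h : d * d ≤ n then
    let s :=
      if n % d = 0 then
        ((if d ≠ n / d then [d, n / d] else [d] : List Nat)).foldl
          (fun (s : Int × Int) (x : Nat) =>
            if 2 ≤ x then
              (s.1 + (x : Int), if n / x ≤ 50 then s.2 + (x : Int) else s.2)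
            else s) s
      else s
    trialGo n (d + 1) s
  else s
termination_by n + 1 - d
decreasing_by
  have hd : d ≤ n := by
    rcases Nat.eq_zero_or_pos d with h0 | h1
    · omega
    · have := Nat.le_mul_of_pos_left d h1; omega
  omega

def bLoop (reqd : Int) (M n : Nat) (p1 p2 : Option Nat) (last : Nat) : Nat × Nat :=
  if _h : n < M then
    let last := n
    let s := trialGo n 1 (0, 0)
    let p1 := if p1 = none ∧ s.1 * 10 + 10 > reqd then some n else p1
    let p2 := if p2 = none ∧ s.2 * 11 + 11 > reqd then some n else p2
    match p1, p2 with
    | some a, some b => (a, b)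
    | p1, p2 => bLoop reqd M (n + 1) p1 p2 last
  else (p1.getD last, p2.getD last)
termination_by M - n

def lowest_house_alt (reqd_num : Int) (N : Int) : Int × Int :=
  let M := N.toNat
  let p := bLoop reqd_num M 0 none none 0
  ((p.1 : Int), (p.2 : Int))

-- ===== PRECONDITION & SPEC =====
def Spec_lowest_house (reqd_num : Int) (N : Int) (out : Int × Int) : Prop := out = lowest_house_alt reqd_num N
instance (reqd_num : Int) (N : Int) (out : Int × Int) : Decidable (Spec_lowest_house reqd_num N out) := by unfold Spec_lowest_house; infer_instance

-- ===== CLAIM (what is proved, stated in full; the proofs are below) =====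
def Claim_equal_lowest_house : Prop := ∀ (reqd_num : Int) (N : Int), Dom_lowest_house reqd_num N → Spec_lowest_house reqd_num N (lowest_house reqd_num N)


-- ===== LEMMAS AND PROOFS =====

-- ---- common spec: sum of divisors ≥ 2 of n satisfying c ----
def DSset (n : Nat) (c : Nat → Bool) : Finset Nat :=
  n.divisors.filter (fun x => 2 ≤ x ∧ c x = true)

def DS (n : Nat) (c : Nat → Bool) : Int := ∑ x ∈ DSset n c, (x : Int)

def allC : Nat → Bool := fun _ => true
def capC (n : Nat) : Nat → Bool := fun x => decide (n / x ≤ 50)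

def fHouse1 (n : Nat) : Int := DS n allC * 10 + 10
def fHouse2 (n : Nat) : Int := DS n (capC n) * 11 + 11

-- first house (< m) whose presents exceed r
def Fpart (f : Nat → Int) (r : Int) (m : Nat) : Option Nat :=
  (List.range m).find? (fun n => decide (f n > r))

def Fres (f : Nat → Int) (r : Int) (M : Nat) : Nat := (Fpart f r M).getD (M - 1)

-- ---- generic fold/array helpers ----
lemma foldl_pair_split {α β γ : Type} (g1 : α → γ → α) (g2 : β → γ → β)
    (ks : List γ) (st : α × β) :
    ks.foldl (fun st k => (g1 st.1 k, g2 st.2 k)) st = (ks.foldl g1 st.1, ks.foldl g2 st.2) := by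
  induction ks generalizing st with
  | nil => rfl
  | cons k ks ih => simp [List.foldl, ih]

lemma modify_get! (a : Array (List Int)) (t j : Nat) (f : List Int → List Int)
    (hj : j < a.size) :
    (a.modify t f)[j]! = if t = j then f a[j]! else a[j]! := by
  have hj' : j < (a.modify t f).size := by simp [hj]
  rw [getElem!_pos (a.modify t f) j hj', getElem!_pos a j hj, Array.getElem_modify]

def innerF (i : Nat) (cnd : Nat → Bool) (ks : List Nat) (a : Array (List Int)) :
    Array (List Int) :=
  ks.foldl (fun a k => if cnd k then a.modify (i * k) (fun l => l ++ [(i : Int)]) else a) a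

lemma innerF_size (i : Nat) (cnd : Nat → Bool) (ks : List Nat) (a : Array (List Int)) :
    (innerF i cnd ks a).size = a.size := by
  induction ks generalizing a with
  | nil => rfl
  | cons k ks ih =>
    simp only [innerF, List.foldl] at ih ⊢
    split <;> simp [ih]

lemma innerF_get (i : Nat) (cnd : Nat → Bool) (hi : 1 ≤ i) :
    ∀ (L s : Nat) (a : Array (List Int)) (j : Nat), j < a.size →
    (innerF i cnd (List.range' s L) a)[j]! =
      if (List.range' s L).any (fun k => decide (i * k = j) && cnd k)
      then a[j]! ++ [(i : Int)] else a[j]! := by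
  intro L
  induction L with
  | zero => intro s a j hj; simp [innerF]
  | succ L ih =>
    intro s a j hj
    rw [List.range'_succ]
    have step : innerF i cnd (s :: List.range' (s + 1) L) a =
        innerF i cnd (List.range' (s + 1) L)
          (if cnd s then a.modify (i * s) (fun l => l ++ [(i : Int)]) else a) := by
      simp only [innerF, List.foldl]
    rw [step]
    have hsz : (if cnd s then a.modify (i * s) (fun l => l ++ [(i : Int)]) else a).size = a.size := by
      split <;> simp
    rw [ih (s + 1) _ j (by rw [hsz]; exact hj)]
    by_cases hmatch : i * s = j
    · -- later k in the range cannot match j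
      have hrest : (List.range' (s + 1) L).any (fun k => decide (i * k = j) && cnd k) = false := by
        rw [List.any_eq_false]
        intro k hk
        have hk' := List.mem_range'_1.mp hk
        have : i * s < i * k := by
          have h1 : i * (s + 1) ≤ i * k := Nat.mul_le_mul_left i (by omega)
          have h2 : i * s + i = i * (s + 1) := by ring
          omega
        simp only [Bool.and_eq_true, decide_eq_true_eq, not_and]
        intro hij; omega
      rw [List.any_cons, hrest]
      by_cases hc : cnd s = true
      · have hmod : (a.modify (i * s) (fun l => l ++ [(i : Int)]))[j]! = a[j]! ++ [(i : Int)] := by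
          rw [modify_get! a (i * s) j _ hj, if_pos hmatch]
        rw [hmatch] at hmod
        simp [hmatch, hc, hmod]
      · have hc' : cnd s = false := by simpa using hc
        simp [hmatch, hc']
    · have hgetj : (if cnd s = true then a.modify (i * s) (fun l => l ++ [(i : Int)]) else a)[j]! = a[j]! := by
        split
        · rw [modify_get! a (i * s) j _ hj, if_neg hmatch]
        · rfl
      rw [List.any_cons, hgetj]
      have hd : decide (i * s = j) = false := by simp [hmatch]
      rw [hd]
      simp only [Bool.false_and, Bool.false_or]

lemma sieveStep_split (M : Nat) (st : Array (List Int) × Array (List Int)) (i : Nat) :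
    sieveStep M st i =
      (innerF i (fun _ => true) (List.range' 1 ((M - 1) / i)) st.1,
       innerF i (fun k => decide (k ≤ 50)) (List.range' 1 ((M - 1) / i)) st.2) := by
  unfold sieveStep innerF
  have key := foldl_pair_split
      (fun (a : Array (List Int)) (k : Nat) =>
        if (fun (_ : Nat) => true) k = true then a.modify (i * k) (fun l => l ++ [(i : Int)]) else a)
      (fun (a : Array (List Int)) (k : Nat) =>
        if decide (k ≤ 50) = true then a.modify (i * k) (fun l => l ++ [(i : Int)]) else a)
      (List.range' 1 ((M - 1) / i)) st
  rw [← key]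
  have hf : (fun (st : Array (List Int) × Array (List Int)) (k : Nat) =>
        (st.1.modify (i * k) (fun l => l ++ [(i : Int)]),
         if k ≤ 50 then st.2.modify (i * k) (fun l => l ++ [(i : Int)]) else st.2)) =
      (fun (st : Array (List Int) × Array (List Int)) (k : Nat) =>
        ((fun (a : Array (List Int)) (k : Nat) =>
            if (fun (_ : Nat) => true) k = true then a.modify (i * k) (fun l => l ++ [(i : Int)]) else a) st.1 k,
         (fun (a : Array (List Int)) (k : Nat) =>
            if decide (k ≤ 50) = true then a.modify (i * k) (fun l => l ++ [(i : Int)]) else a) st.2 k)) := by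
    funext st k
    simp
  rw [hf]

lemma ks_any (i j M : Nat) (c : Nat → Bool) (hi : 2 ≤ i) (hj : j < M) :
    (List.range' 1 ((M - 1) / i)).any (fun k => decide (i * k = j) && c k) =
      (decide (i ∣ j) && decide (i ≤ j) && c (j / i)) := by
  by_cases h : i ∣ j ∧ i ≤ j
  · obtain ⟨hdvd, hle⟩ := h
    have hipos : 0 < i := by omega
    have hk : i * (j / i) = j := Nat.mul_div_cancel' hdvd
    have h1 : 1 ≤ j / i := by
      rw [Nat.le_div_iff_mul_le hipos]; omega
    have h2 : j / i ≤ (M - 1) / i := Nat.div_le_div_right (by omega)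
    have hmem : j / i ∈ List.range' 1 ((M - 1) / i) := List.mem_range'_1.mpr (by omega)
    by_cases hc : c (j / i) = true
    · rw [List.any_eq_true.mpr ⟨j / i, hmem, by simp [hk, hc]⟩]
      simp [hdvd, hle, hc]
    · have : (List.range' 1 ((M - 1) / i)).any (fun k => decide (i * k = j) && c k) = false := by
        rw [List.any_eq_false]
        intro k hk'
        simp only [Bool.and_eq_true, decide_eq_true_eq, not_and]
        intro hik
        have : k = j / i := by
          subst hik; exact (Nat.mul_div_cancel_left k hipos).symm
        subst this
        exact fun hcc => hc hcc
      rw [this]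
      simp [hdvd, hle, Bool.eq_false_iff.mp (by simpa using hc)]
  · have : (List.range' 1 ((M - 1) / i)).any (fun k => decide (i * k = j) && c k) = false := by
      rw [List.any_eq_false]
      intro k hk'
      have hk'' := List.mem_range'_1.mp hk'
      simp only [Bool.and_eq_true, decide_eq_true_eq, not_and]
      intro hik
      exfalso
      exact h ⟨⟨k, hik.symm⟩, by
        have : i * 1 ≤ i * k := Nat.mul_le_mul_left i (by omega)
        omega⟩
    rw [this]
    rcases Decidable.not_and_iff_not_or_not.mp h with h' | h' <;> simp [h']

def sieveState (M t : Nat) : Array (List Int) × Array (List Int) :=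
  (List.range' 2 t).foldl (sieveStep M)
    (Array.replicate M ([] : List Int), Array.replicate M ([] : List Int))

lemma sieve_char (M t : Nat) :
    (sieveState M t).1.size = M ∧ (sieveState M t).2.size = M ∧
    ∀ j, j < M →
      (sieveState M t).1[j]! =
        ((List.range' 2 t).filter (fun i => decide (i ∣ j) && decide (i ≤ j) && allC (j / i))).map
          (fun i => Int.ofNat i) ∧
      (sieveState M t).2[j]! =
        ((List.range' 2 t).filter
            (fun i => decide (i ∣ j) && decide (i ≤ j) && decide (j / i ≤ 50))).map
          (fun i => Int.ofNat i) := by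
  induction t with
  | zero =>
    refine ⟨by simp [sieveState], by simp [sieveState], ?_⟩
    intro j hj
    have hrep : (Array.replicate M ([] : List Int))[j]! = ([] : List Int) := by
      rw [getElem!_pos _ _ (by simpa using hj), Array.getElem_replicate]
    constructor <;> simp [sieveState, hrep]
  | succ t ih =>
    obtain ⟨h1, h2, hent⟩ := ih
    have hstep : sieveState M (t + 1) = sieveStep M (sieveState M t) (2 + t) := by
      unfold sieveState
      rw [List.range'_concat]
      simp [List.foldl_append]
    rw [hstep, sieveStep_split]
    refine ⟨by simp [innerF_size, h1], by simp [innerF_size, h2], ?_⟩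
    intro j hj
    have hi2 : 2 ≤ 2 + t := by omega
    constructor
    · rw [innerF_get (2 + t) _ (by omega) _ 1 _ j (by rw [h1]; exact hj),
        ks_any (2 + t) j M _ hi2 hj, (hent j hj).1, List.range'_concat,
        List.filter_append, List.map_append]
      simp only [one_mul, List.filter_cons, List.filter_nil]
      simp only [allC, Bool.and_true]
      split_ifs <;> simp
    · rw [innerF_get (2 + t) _ (by omega) _ 1 _ j (by rw [h2]; exact hj),
        ks_any (2 + t) j M _ hi2 hj, (hent j hj).2, List.range'_concat,
        List.filter_append, List.map_append]
      simp only [one_mul, List.filter_cons, List.filter_nil]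
      split_ifs <;> simp

-- ---- sum bridge: the sieve row sums are DS ----
lemma range'_filter_sum (p : Nat → Bool) (a t : Nat) :
    (((List.range' a t).filter p).map (fun i => Int.ofNat i)).sum =
      ∑ x ∈ Finset.Ico a (a + t), (if p x then (x : Int) else 0) := by
  induction t with
  | zero => simp
  | succ t ih =>
    rw [List.range'_concat, List.filter_append, List.map_append, List.sum_append, ih,
      Nat.add_succ, Finset.sum_Ico_succ_top (by omega)]
    simp only [one_mul, List.filter_cons, List.filter_nil]
    split_ifs <;> simp

lemma bridge (c : Nat → Bool) (M j : Nat) (hj : j < M) :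
    pySum (((List.range' 2 (M - 2)).filter
        (fun i => decide (i ∣ j) && decide (i ≤ j) && c (j / i))).map (fun i => Int.ofNat i)) =
      DS j (fun x => c (j / x)) := by
  have hps : ∀ l : List Int, pySum l = l.sum := by
    intro l
    rw [pySum, List.sum_eq_foldl]
  rw [hps, range'_filter_sum]
  rw [← Finset.sum_filter (fun x => (decide (x ∣ j) && decide (x ≤ j) && c (j / x)) = true)
      (fun x => (x : Int))]
  have hset : (Finset.Ico 2 (2 + (M - 2))).filter
      (fun x => (decide (x ∣ j) && decide (x ≤ j) && c (j / x)) = true) =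
      DSset j (fun x => c (j / x)) := by
    ext x
    simp only [Finset.mem_filter, Finset.mem_Ico, Nat.mem_divisors, DSset, Bool.and_eq_true,
      decide_eq_true_eq]
    constructor
    · rintro ⟨⟨h2x, hxM⟩, ⟨⟨hdvd, hxj⟩, hc⟩⟩
      exact ⟨⟨hdvd, by omega⟩, ⟨h2x, hc⟩⟩
    · rintro ⟨⟨hdvd, hj0⟩, ⟨h2x, hc⟩⟩
      have hxj : x ≤ j := Nat.le_of_dvd (by omega) hdvd
      exact ⟨⟨h2x, by omega⟩, ⟨⟨hdvd, hxj⟩, hc⟩⟩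
  rw [hset, DS]

-- ---- loop A characterisation ----
lemma loopA_congr (f g : Nat → Int) (r : Int) (M : Nat) (hfg : ∀ m, m < M → f m = g m) :
    ∀ fuel k, M - k ≤ fuel → loopA f r M k = loopA g r M k := by
  intro fuel
  induction fuel with
  | zero =>
    intro k hk
    have : ¬ k < M := by omega
    rw [loopA]
    conv_rhs => rw [loopA]
    simp [this]
  | succ fuel ih =>
    intro k hk
    rw [loopA]
    conv_rhs => rw [loopA]
    by_cases hkM : k < M
    · rw [dif_pos hkM, dif_pos hkM, hfg k hkM]
      split_ifs
      · rfl
      · exact ih (k + 1) (by omega)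
      · rfl
    · rw [dif_neg hkM, dif_neg hkM]

lemma loopA_eq (f : Nat → Int) (r : Int) (M : Nat) :
    ∀ fuel k, M - k ≤ fuel → k < M →
      loopA f r M k =
        ((List.range' k (M - k)).find? (fun n => decide (f n > r))).getD (M - 1) := by
  intro fuel
  induction fuel with
  | zero => intro k hk hkM; omega
  | succ fuel ih =>
    intro k hk hkM
    rw [loopA, dif_pos hkM]
    have hMk : M - k = (M - k - 1) + 1 := by omega
    rw [hMk, List.range'_succ]
    rw [List.find?_cons]
    by_cases hfk : f k > r
    · simp [hfk]
    · have hfk' : decide (f k > r) = false := by simpa using hfk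
      rw [hfk']
      simp only [if_neg hfk]
      by_cases hk1 : k + 1 < M
      · rw [if_pos hk1, ih (k + 1) (by omega) hk1]
        congr 2
      · rw [if_neg hk1]
        have : M - k - 1 = 0 := by omega
        rw [this]
        simp only [List.range'_zero, List.find?_nil, Option.getD_none]
        omega

lemma loopA_main (f : Nat → Int) (r : Int) (M : Nat) : loopA f r M 0 = Fres f r M := by
  rcases Nat.eq_zero_or_pos M with h0 | hpos
  · subst h0
    rw [loopA]
    simp [Fres, Fpart]
  · rw [loopA_eq f r M M 0 (by omega) hpos, Fres, Fpart, List.range_eq_range']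
    congr 2

-- ---- trial division characterisation ----
def Rem (n d : Nat) : Finset Nat :=
  n.divisors.filter (fun x => 2 ≤ x ∧ d ≤ x ∧ d ≤ n / x)

lemma rem_empty (n d : Nat) (h : ¬ d * d ≤ n) : Rem n d = ∅ := by
  ext x
  simp only [Rem, Finset.mem_filter, Nat.mem_divisors, Finset.notMem_empty, iff_false, not_and]
  rintro ⟨hx, hn⟩ h2 hdx hdnx
  have h1 : d * d ≤ x * (n / x) := Nat.mul_le_mul hdx hdnx
  have h2' : x * (n / x) ≤ n := Nat.mul_div_le n x
  omega

lemma rem_succ_ndvd (n d : Nat) (hdvd : ¬ d ∣ n) : Rem n d = Rem n (d + 1) := by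
  ext x
  simp only [Rem, Finset.mem_filter, Nat.mem_divisors]
  constructor
  · rintro ⟨⟨hx, hn⟩, h2, hdx, hdnx⟩
    refine ⟨⟨hx, hn⟩, h2, ?_, ?_⟩
    · rcases Nat.lt_or_ge d x with h | h
      · omega
      · exfalso; have : x = d := by omega
        subst this; exact hdvd hx
    · rcases Nat.lt_or_ge d (n / x) with h | h
      · omega
      · exfalso
        have hex : n / x = d := by omega
        exact hdvd (hex ▸ Nat.div_dvd_of_dvd hx)
  · rintro ⟨⟨hx, hn⟩, h2, hdx, hdnx⟩
    exact ⟨⟨hx, hn⟩, h2, by omega, by omega⟩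

lemma rem_succ_dvd (n d : Nat) (hd : 1 ≤ d) (hdd : d * d ≤ n) (hdvd : d ∣ n)
    (q : Nat → Prop) [DecidablePred q] :
    ∑ x ∈ (Rem n d).filter q, (x : Int) =
      ∑ x ∈ (Rem n (d + 1)).filter q, (x : Int)
        + (if 2 ≤ d ∧ q d then (d : Int) else 0)
        + (if d ≠ n / d ∧ 2 ≤ n / d ∧ q (n / d) then ((n / d : Nat) : Int) else 0) := by
  have hn : n ≠ 0 := by
    intro h; subst h
    have := Nat.le_mul_of_pos_left d (by omega : 0 < d)
    omega
  have hde : d ≤ n / d := (Nat.le_div_iff_mul_le (by omega)).mpr hdd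
  have hne : n / (n / d) = d := Nat.div_div_self hdvd hn
  have hedvd : n / d ∣ n := Nat.div_dvd_of_dvd hdvd
  have hsplit : Rem n d = Rem n (d + 1) ∪ ({d, n / d} : Finset Nat).filter (fun x => 2 ≤ x) := by
    ext x
    simp only [Rem, Finset.mem_union, Finset.mem_filter, Nat.mem_divisors, Finset.mem_insert,
      Finset.mem_singleton]
    constructor
    · rintro ⟨⟨hx, hn'⟩, h2, hdx, hdnx⟩
      by_cases hx1 : d + 1 ≤ x ∧ d + 1 ≤ n / x
      · exact Or.inl ⟨⟨hx, hn'⟩, h2, hx1.1, hx1.2⟩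
      · right
        rcases Decidable.not_and_iff_not_or_not.mp hx1 with h | h
        · have : x = d := by omega
          exact ⟨Or.inl this, h2⟩
        · have hex : n / x = d := by omega
          have : n / (n / x) = x := Nat.div_div_self hx hn'
          rw [hex] at this
          exact ⟨Or.inr this.symm, h2⟩
    · rintro (⟨⟨hx, hn'⟩, h2, hdx, hdnx⟩ | ⟨hx, h2⟩)
      · exact ⟨⟨hx, hn'⟩, h2, by omega, by omega⟩
      · rcases hx with rfl | rfl
        · exact ⟨⟨hdvd, hn⟩, h2, le_refl _, hde⟩
        · exact ⟨⟨hedvd, hn⟩, h2, hde, by omega⟩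
  have hdisj : Disjoint (Rem n (d + 1)) (({d, n / d} : Finset Nat).filter (fun x => 2 ≤ x)) := by
    rw [Finset.disjoint_right]
    intro x hx hmem
    simp only [Finset.mem_filter, Finset.mem_insert, Finset.mem_singleton] at hx
    simp only [Rem, Finset.mem_filter, Nat.mem_divisors] at hmem
    obtain ⟨_, _, hdx, hdnx⟩ := hmem
    rcases hx.1 with rfl | rfl
    · omega
    · omega
  rw [hsplit, Finset.filter_union, Finset.sum_union (Finset.disjoint_filter_filter hdisj),
    add_assoc]
  congr 1
  rw [Finset.filter_filter]
  by_cases hdeq : d = n / d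
  · have hset : ({d, n / d} : Finset Nat) = {d} := by rw [← hdeq]; simp
    rw [hset, Finset.filter_singleton]
    have hneg : ¬ (d ≠ n / d ∧ 2 ≤ n / d ∧ q (n / d)) := fun h => h.1 hdeq
    rw [if_neg hneg, add_zero]
    by_cases h1 : 2 ≤ d ∧ q d
    · rw [if_pos h1, if_pos h1, Finset.sum_singleton]
    · rw [if_neg h1, if_neg h1, Finset.sum_empty]
  · have hpair : ({d, n / d} : Finset Nat).filter (fun x => 2 ≤ x ∧ q x) =
        ({d} : Finset Nat).filter (fun x => 2 ≤ x ∧ q x) ∪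
        ({n / d} : Finset Nat).filter (fun x => 2 ≤ x ∧ q x) := by
      rw [← Finset.filter_union, Finset.insert_eq]
    have hdisj2 : Disjoint (({d} : Finset Nat).filter (fun x => 2 ≤ x ∧ q x))
        (({n / d} : Finset Nat).filter (fun x => 2 ≤ x ∧ q x)) := by
      rw [Finset.disjoint_left]
      intro x hx hy
      simp only [Finset.mem_filter, Finset.mem_singleton] at hx hy
      exact hdeq (by omega)
    rw [hpair, Finset.sum_union hdisj2, Finset.filter_singleton, Finset.filter_singleton]
    by_cases h1 : 2 ≤ d ∧ q d <;> by_cases h2 : 2 ≤ n / d ∧ q (n / d)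
    · simp only [if_pos h1, if_pos h2, Finset.sum_singleton]
      rw [if_pos (⟨hdeq, h2.1, h2.2⟩ : d ≠ n / d ∧ 2 ≤ n / d ∧ q (n / d))]
    · have hneg : ¬ (d ≠ n / d ∧ 2 ≤ n / d ∧ q (n / d)) := fun h => h2 ⟨h.2.1, h.2.2⟩
      simp only [if_pos h1, if_neg h2, if_neg hneg, Finset.sum_singleton, Finset.sum_empty,
        add_zero]
    · have hpos : d ≠ n / d ∧ 2 ≤ n / d ∧ q (n / d) := ⟨hdeq, h2.1, h2.2⟩
      simp only [if_neg h1, if_pos h2, if_pos hpos, Finset.sum_singleton, Finset.sum_empty,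
        zero_add]
    · have hneg : ¬ (d ≠ n / d ∧ 2 ≤ n / d ∧ q (n / d)) := fun h => h2 ⟨h.2.1, h.2.2⟩
      simp only [if_neg h1, if_neg h2, if_neg hneg, Finset.sum_empty, add_zero]

lemma step_eq (n : Nat) (s : Int × Int) (x : Nat) :
    (if 2 ≤ x then (s.1 + (x : Int), if n / x ≤ 50 then s.2 + (x : Int) else s.2) else s)
      = (s.1 + (if 2 ≤ x then (x : Int) else 0),
         s.2 + (if 2 ≤ x ∧ n / x ≤ 50 then (x : Int) else 0)) := by
  split_ifs <;> (try tauto) <;> simp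

set_option maxHeartbeats 1000000 in
lemma trialGo_char (n : Nat) :
    ∀ fuel d (s : Int × Int), n + 1 - d ≤ fuel → 1 ≤ d →
      trialGo n d s =
        (s.1 + ∑ x ∈ Rem n d, (x : Int),
         s.2 + ∑ x ∈ (Rem n d).filter (fun x => n / x ≤ 50), (x : Int)) := by
  intro fuel
  induction fuel with
  | zero =>
    intro d s hf hd
    have hdd : ¬ d * d ≤ n := by
      have := Nat.le_mul_of_pos_left d (by omega : 0 < d)
      omega
    rw [trialGo, dif_neg hdd, rem_empty n d hdd]
    simp
  | succ fuel ih =>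
    intro d s hf hd
    by_cases hdd : d * d ≤ n
    · have hn : n ≠ 0 := by
        intro h; subst h
        have := Nat.le_mul_of_pos_left d (by omega : 0 < d)
        omega
      rw [trialGo]
      simp only [dif_pos hdd]
      by_cases hdvd : n % d = 0
      · have hdvd' : d ∣ n := Nat.dvd_of_mod_eq_zero hdvd
        have hne : n / (n / d) = d := Nat.div_div_self hdvd' hn
        have hsum1 : ∑ x ∈ Rem n d, (x : Int) =
            ∑ x ∈ Rem n (d + 1), (x : Int)
              + (if 2 ≤ d then (d : Int) else 0)
              + (if d ≠ n / d ∧ 2 ≤ n / d then ((n / d : Nat) : Int) else 0) := by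
          have h := rem_succ_dvd n d hd hdd hdvd' (fun _ => True)
          simp only [Finset.filter_true, and_true] at h
          exact h
        have hsum2 : ∑ x ∈ (Rem n d).filter (fun x => n / x ≤ 50), (x : Int) =
            ∑ x ∈ (Rem n (d + 1)).filter (fun x => n / x ≤ 50), (x : Int)
              + (if 2 ≤ d ∧ n / d ≤ 50 then (d : Int) else 0)
              + (if d ≠ n / d ∧ 2 ≤ n / d ∧ d ≤ 50 then ((n / d : Nat) : Int) else 0) := by
          have h := rem_succ_dvd n d hd hdd hdvd' (fun x => n / x ≤ 50)
          rw [hne] at h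
          exact h
        rw [if_pos hdvd]
        by_cases hde : d = n / d
        · rw [if_neg (not_not_intro hde)]
          simp only [List.foldl_cons, List.foldl_nil, step_eq]
          rw [ih (d + 1) _ (by omega) (by omega), hsum1, hsum2]
          have hne' : ¬ (d ≠ n / d ∧ 2 ≤ n / d) := fun h => h.1 hde
          have hne'' : ¬ (d ≠ n / d ∧ 2 ≤ n / d ∧ d ≤ 50) := fun h => h.1 hde
          rw [if_neg hne', if_neg hne'', Prod.mk.injEq]
          constructor <;> ring
        · rw [if_pos hde]
          simp only [List.foldl_cons, List.foldl_nil, step_eq]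
          rw [ih (d + 1) _ (by omega) (by omega), hsum1, hsum2]
          simp only [hne]
          have e1 : (if d ≠ n / d ∧ 2 ≤ n / d then ((n / d : Nat) : Int) else 0)
              = (if 2 ≤ n / d then ((n / d : Nat) : Int) else 0) := by
            split_ifs <;> tauto
          have e2 : (if d ≠ n / d ∧ 2 ≤ n / d ∧ d ≤ 50 then ((n / d : Nat) : Int) else 0)
              = (if 2 ≤ n / d ∧ d ≤ 50 then ((n / d : Nat) : Int) else 0) := by
            split_ifs <;> tauto
          rw [e1, e2, Prod.mk.injEq]
          constructor <;> ring
      · have hndvd : ¬ d ∣ n := fun hc => hdvd (Nat.eq_zero_of_dvd_of_lt hc |> fun _ => by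
          omega)
        rw [if_neg hdvd, ih (d + 1) s (by omega) (by omega), rem_succ_ndvd n d hndvd]
    · rw [trialGo, dif_neg hdd, rem_empty n d hdd]
      simp

lemma trial_eq (n : Nat) : trialGo n 1 (0, 0) = (DS n allC, DS n (capC n)) := by
  rw [trialGo_char n (n + 1) 1 (0, 0) (by omega) (by omega)]
  have hmem : ∀ x ∈ n.divisors, 1 ≤ x ∧ 1 ≤ n / x := by
    intro x hx
    rw [Nat.mem_divisors] at hx
    obtain ⟨hdvd, hn⟩ := hx
    have hx0 : 0 < x := by
      rcases Nat.eq_zero_or_pos x with h | h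
      · subst h
        rw [Nat.zero_dvd] at hdvd
        exact absurd hdvd hn
      · exact h
    have hxn : x ≤ n := Nat.le_of_dvd (by omega) hdvd
    exact ⟨by omega, (Nat.le_div_iff_mul_le hx0).mpr (by omega)⟩
  have h1 : Rem n 1 = DSset n allC := by
    ext x
    simp only [Rem, DSset, allC, Finset.mem_filter, and_true]
    constructor
    · rintro ⟨hx, h2, _, _⟩; exact ⟨hx, h2⟩
    · rintro ⟨hx, h2⟩
      exact ⟨hx, h2, (hmem x hx).1, (hmem x hx).2⟩
  have h2 : (Rem n 1).filter (fun x => n / x ≤ 50) = DSset n (capC n) := by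
    ext x
    simp only [Rem, DSset, capC, Finset.mem_filter, decide_eq_true_eq]
    constructor
    · rintro ⟨⟨hx, h2, _, _⟩, hcap⟩; exact ⟨hx, h2, hcap⟩
    · rintro ⟨hx, h2, hcap⟩
      exact ⟨⟨hx, h2, (hmem x hx).1, (hmem x hx).2⟩, hcap⟩
  rw [h2, h1]
  simp [DS]

-- ---- fused loop B characterisation ----
lemma Fpart_mono (f : Nat → Int) (r : Int) {n M : Nat} {a : Nat} (h : n ≤ M)
    (ha : Fpart f r n = some a) : Fpart f r M = some a := by
  have hsplit : List.range M = List.range n ++ List.range' n (M - n) := by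
    rw [List.range_eq_range', List.range_eq_range']
    have h := List.range'_append (s := 0) (m := n) (n := M - n) (step := 1)
    simp only [Nat.zero_add, Nat.one_mul] at h
    have hM : n + (M - n) = M := by omega
    rw [hM] at h
    exact h.symm
  rw [Fpart] at ha ⊢
  rw [hsplit, List.find?_append, ha]
  rfl

lemma Fpart_succ (f : Nat → Int) (r : Int) (n : Nat) :
    Fpart f r (n + 1) = (Fpart f r n).or (if f n > r then some n else none) := by
  rw [Fpart, List.range_succ, List.find?_append]
  have : (List.find? (fun m => decide (f m > r)) [n]) = (if f n > r then some n else none) := by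
    by_cases h : f n > r <;> simp [h]
  rw [this]
  rfl

lemma bLoop_eq (r : Int) (M : Nat) :
    ∀ fuel n p1 p2, M - n ≤ fuel → n ≤ M →
      p1 = Fpart fHouse1 r n → p2 = Fpart fHouse2 r n →
      bLoop r M n p1 p2 (n - 1) = (Fres fHouse1 r M, Fres fHouse2 r M) := by
  intro fuel
  induction fuel with
  | zero =>
    intro n p1 p2 hf hnM hp1 hp2
    have hn : n = M := by omega
    subst hn
    rw [bLoop, dif_neg (lt_irrefl n), hp1, hp2]
    rfl
  | succ fuel ih =>
    intro n p1 p2 hf hnM hp1 hp2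
    by_cases h : n < M
    · rw [bLoop, dif_pos h]
      simp only [trial_eq]
      have hc1 : (if p1 = none ∧ (DS n allC) * 10 + 10 > r then some n else p1) =
          Fpart fHouse1 r (n + 1) := by
        rw [Fpart_succ, ← hp1]
        rcases p1 with _ | a
        · simp only [Option.none_or, true_and]
          rfl
        · simp
      have hc2 : (if p2 = none ∧ (DS n (capC n)) * 11 + 11 > r then some n else p2) =
          Fpart fHouse2 r (n + 1) := by
        rw [Fpart_succ, ← hp2]
        rcases p2 with _ | a
        · simp only [Option.none_or, true_and]
          rfl
        · simp
      rw [hc1, hc2]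
      rcases hA : Fpart fHouse1 r (n + 1) with _ | a <;>
        rcases hB : Fpart fHouse2 r (n + 1) with _ | b
      · exact ih (n + 1) none none (by omega) (by omega) hA.symm hB.symm
      · exact ih (n + 1) none (some b) (by omega) (by omega) hA.symm hB.symm
      · exact ih (n + 1) (some a) none (by omega) (by omega) hA.symm hB.symm
      · have m1 := Fpart_mono fHouse1 r (show n + 1 ≤ M by omega) hA
        have m2 := Fpart_mono fHouse2 r (show n + 1 ≤ M by omega) hB
        show (a, b) = _
        rw [Fres, Fres, m1, m2]
        rfl
    · have hn : n = M := by omega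
      subst hn
      rw [bLoop, dif_neg (lt_irrefl n), hp1, hp2]
      rfl

-- ---- assembling both sides ----
lemma a_side (r N : Int) :
    lowest_house r N = ((Fres fHouse1 r N.toNat : Int), (Fres fHouse2 r N.toNat : Int)) := by
  obtain ⟨h1, h2, hent⟩ := sieve_char N.toNat (N.toNat - 2)
  simp only [lowest_house]
  rw [show (List.foldl (sieveStep N.toNat)
      (Array.replicate N.toNat ([] : List Int), Array.replicate N.toNat ([] : List Int))
      (List.range' 2 (N.toNat - 2))) = sieveState N.toNat (N.toNat - 2) from rfl]
  have hcong1 : ∀ m, m < N.toNat →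
      pySum (sieveState N.toNat (N.toNat - 2)).1[m]! * 10 + 10 = fHouse1 m := by
    intro m hm
    rw [(hent m hm).1, bridge allC N.toNat m hm]
    rfl
  have hcong2 : ∀ m, m < N.toNat →
      pySum (sieveState N.toNat (N.toNat - 2)).2[m]! * 11 + 11 = fHouse2 m := by
    intro m hm
    rw [(hent m hm).2, bridge (fun k => decide (k ≤ 50)) N.toNat m hm]
    rfl
  rw [loopA_congr _ fHouse1 r N.toNat hcong1 N.toNat 0 (by omega),
    loopA_congr _ fHouse2 r N.toNat hcong2 N.toNat 0 (by omega),
    loopA_main, loopA_main]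

lemma b_side (r N : Int) :
    lowest_house_alt r N = ((Fres fHouse1 r N.toNat : Int), (Fres fHouse2 r N.toNat : Int)) := by
  simp only [lowest_house_alt]
  have h := bLoop_eq r N.toNat N.toNat 0 none none (by omega) (by omega) rfl rfl
  rw [Nat.zero_sub] at h
  rw [h]

-- ===== VERDICT (by name: the statement is the Claim_ definition above) =====
theorem lowest_house_spec : Claim_equal_lowest_house := by
  intro r N _
  unfold Spec_lowest_house
  rw [a_side, b_side]
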